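-- pv_equiv track=rewrite | github.com/yonjaeee/AlgorithmStudy | 프로그래머스/2018_카카오블라인드/lv1_1차_비밀지도.py | solution
-- ===== SOURCE A (Python) =====
-- def solution(n, arr1, arr2):
--     answer = []
--     for i in range(n):
--         ans = ''
--         arr1_b = str(format(arr1[i], 'b'))
--         arr2_b = str(format(arr2[i], 'b'))
--         arr1_b = (n - len(arr1_b)) * '0' + arr1_b
--         arr2_b = (n - len(arr2_b)) * '0' + arr2_b
--         for j in range(n):
--             if int(arr1_b[j]) + int(arr2_b[j]) >= 1:
--                 ans += '#'
--             else:
--                 ans += ' '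
--         answer.append(ans)
--     return answer
-- ===== SOURCE B (Python) =====
-- def solution(n, arr1, arr2):
--     table = str.maketrans('10', '# ')
--     return [format(arr1[i] | arr2[i], 'b').zfill(n).translate(table) for i in range(n)]
-- ===== Notes on version B (the rewrite author's own statement) =====
-- stated objective: simpler
-- what changed: The inner per-bit loop over two zero-padded binary strings (char indexing, int() on each char, string concatenation) is replaced by one integer bitwise OR per row followed by format/zfill/translate; what is maintained per row is an integer, not two character strings scanned in parallel.
-- outside the precondition, e.g. on solution(1, [2], [0]): A returns ['#'], B returns ['# ']
import Mathlib
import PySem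

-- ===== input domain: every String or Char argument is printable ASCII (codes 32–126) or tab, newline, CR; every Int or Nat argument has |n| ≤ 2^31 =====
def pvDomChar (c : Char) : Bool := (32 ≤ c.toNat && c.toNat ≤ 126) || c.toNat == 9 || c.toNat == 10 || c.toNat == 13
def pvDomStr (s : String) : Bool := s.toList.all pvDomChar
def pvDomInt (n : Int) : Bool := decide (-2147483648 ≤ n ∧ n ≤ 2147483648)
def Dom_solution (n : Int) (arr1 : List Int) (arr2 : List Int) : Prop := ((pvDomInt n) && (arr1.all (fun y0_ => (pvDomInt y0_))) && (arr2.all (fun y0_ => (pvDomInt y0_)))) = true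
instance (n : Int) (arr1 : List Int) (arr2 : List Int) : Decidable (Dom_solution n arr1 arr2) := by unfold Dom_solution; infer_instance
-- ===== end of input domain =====

-- B replaces A's per-bit inner loop over two padded binary strings with one integer
-- bitwise OR per row followed by binary formatting, zfill and a character translation (objective: simpler).

-- ===== PORT A =====
-- A, transliterated: rows built by an outer loop over range(n); per row the two binary
-- strings (format(·,'b') = PySem.Int.toBinChars) are left-padded with (n - len)*'0'
-- (Python's negative string repeat gives '', matched by Int.toNat clamping), then an
-- inner loop over range(n) appends '#' or ' ' from int(char)+int(char) >= 1.
def solution (n : Int) (arr1 : List Int) (arr2 : List Int) : List String :=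
  (PySem.List.pyRange 0 n 1).foldl (fun answer i =>
    let arr1b := PySem.Int.toBinChars (PySem.List.pyGetD arr1 i 0)
    let arr2b := PySem.Int.toBinChars (PySem.List.pyGetD arr2 i 0)
    let arr1b := List.replicate (n - (arr1b.length : Int)).toNat '0' ++ arr1b
    let arr2b := List.replicate (n - (arr2b.length : Int)).toNat '0' ++ arr2b
    let ans := (PySem.List.pyRange 0 n 1).foldl (fun ans j =>
      if (PySem.Int.ofChars? [PySem.List.pyGetD arr1b j ' ']).getD 0 +
         (PySem.Int.ofChars? [PySem.List.pyGetD arr2b j ' ']).getD 0 ≥ 1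
      then ans ++ ['#'] else ans ++ [' ']) ([] : List Char)
    answer ++ [String.ofList ans]) []

-- ===== PORT B =====
-- str.maketrans('10', '# ') / .translate, ported as the corresponding character map.
def pvTranslate (c : Char) : Char := if c = '1' then '#' else if c = '0' then ' ' else c

def solution_alt (n : Int) (arr1 : List Int) (arr2 : List Int) : List String :=
  (PySem.List.pyRange 0 n 1).map (fun i =>
    String.ofList ((PySem.Chars.zfill
      (PySem.Int.toBinChars (PySem.Int.bor (PySem.List.pyGetD arr1 i 0) (PySem.List.pyGetD arr2 i 0)))
      n).map pvTranslate))

-- ===== PRECONDITION & SPEC =====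
-- Pre_ excludes (a) inputs where A raises (n beyond the arrays' length: IndexError;
-- negative entries: int('-') ValueError) and (b) rows whose value is ≥ 2^n — out of the
-- problem's stated domain — where no width-n overlay is specified and A's padding
-- arithmetic happens to read the leading n bits of the wider string while B keeps the
-- full width; only the first n entries are constrained because A reads no others.
def Pre_solution (n : Int) (arr1 : List Int) (arr2 : List Int) : Prop :=
  n ≤ (arr1.length : Int) ∧ n ≤ (arr2.length : Int) ∧
  (∀ a ∈ arr1.take n.toNat, 0 ≤ a ∧ a < 2 ^ n.toNat) ∧
  (∀ b ∈ arr2.take n.toNat, 0 ≤ b ∧ b < 2 ^ n.toNat)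
instance (n : Int) (arr1 : List Int) (arr2 : List Int) : Decidable (Pre_solution n arr1 arr2) := by
  unfold Pre_solution; infer_instance

def pvWitness_solution : Int × List Int × List Int := (2, [3, 1], [0, 2])

def Spec_solution (n : Int) (arr1 : List Int) (arr2 : List Int) (out : List String) : Prop :=
  out = solution_alt n arr1 arr2
instance (n : Int) (arr1 : List Int) (arr2 : List Int) (out : List String) :
    Decidable (Spec_solution n arr1 arr2 out) := by unfold Spec_solution; infer_instance

-- ===== CLAIM (what is proved, stated in full; the proofs are below) =====
def Claim_equal_solution : Prop := ∀ (n : Int) (arr1 : List Int) (arr2 : List Int),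
  Dom_solution n arr1 arr2 → Pre_solution n arr1 arr2 →
  Spec_solution n arr1 arr2 (solution n arr1 arr2)

-- ===== LEMMAS AND PROOFS =====

-- little-endian binary digits of a natural number (bit k at position k)
def pvLbits : Nat → List Char
  | 0 => []
  | m + 1 => (((m + 1) % 2).digitChar) :: pvLbits ((m + 1) / 2)
decreasing_by exact Nat.div_lt_self (Nat.succ_pos m) (by omega)

theorem pvLbits_zero : pvLbits 0 = [] := by simp [pvLbits]

def pvLbits' (m : Nat) : List Char := if m = 0 then ['0'] else pvLbits m

-- big-endian, width-n bit string of m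
def pvBits (n m : Nat) : List Char :=
  (List.range n).map (fun j => if m.testBit (n - 1 - j) then '1' else '0')

theorem pvLbits_pos (m : Nat) (h : m ≠ 0) :
    pvLbits m = (m % 2).digitChar :: pvLbits (m / 2) := by
  cases m with
  | zero => exact absurd rfl h
  | succ k => rw [pvLbits]

theorem pvToDigitsCore_eq (f : Nat) : ∀ (m : Nat) (acc : List Char), m < f →
    Nat.toDigitsCore 2 f m acc = (pvLbits' m).reverse ++ acc := by
  induction f with
  | zero => intro m acc h; omega
  | succ f ih =>
    intro m acc h
    show (if m / 2 = 0 then (m % 2).digitChar :: acc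
          else Nat.toDigitsCore 2 f (m / 2) ((m % 2).digitChar :: acc)) = _
    by_cases h2 : m / 2 = 0
    · simp only [h2, if_true]
      have hm01 : m = 0 ∨ m = 1 := by omega
      rcases hm01 with rfl | rfl <;> simp [pvLbits', pvLbits, Nat.digitChar]
    · have hm : m ≠ 0 := by omega
      have hlt : m / 2 < f := by omega
      rw [if_neg h2, ih (m / 2) _ hlt]
      simp [pvLbits', hm, h2, pvLbits_pos m hm]

theorem pvToDigits_eq (m : Nat) : Nat.toDigits 2 m = (pvLbits' m).reverse :=
  (pvToDigitsCore_eq (m + 1) m [] (by omega)).trans (by simp)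

theorem pvLbits_chars (m : Nat) : ∀ c ∈ pvLbits m, c = '0' ∨ c = '1' := by
  induction m using Nat.strong_induction_on with
  | _ m ih =>
    intro c hc
    cases m with
    | zero => simp [pvLbits] at hc
    | succ k =>
      rw [pvLbits_pos (k+1) (by omega), List.mem_cons] at hc
      rcases hc with hc | hc
      · have hm : (k+1) % 2 = 0 ∨ (k+1) % 2 = 1 := by omega
        rcases hm with h | h <;> rw [hc, h]
        · left; rfl
        · right; rfl
      · exact ih ((k+1)/2) (by omega) c hc

theorem pvLbits'_chars (m : Nat) : ∀ c ∈ pvLbits' m, c = '0' ∨ c = '1' := by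
  intro c hc
  unfold pvLbits' at hc
  by_cases h : m = 0
  · simp [h] at hc; exact Or.inl hc
  · exact pvLbits_chars m c (by simpa [h] using hc)

theorem pvLbits'_ne_nil (m : Nat) : pvLbits' m ≠ [] := by
  unfold pvLbits'
  by_cases h : m = 0
  · simp [h]
  · simp only [h, if_false]
    rw [pvLbits_pos m h]; simp

-- little-endian bits of m, right-padded with '0' to width n, are the testBit string
theorem pvLbits_pad (n : Nat) : ∀ m : Nat, 1 ≤ m → m < 2 ^ n →
    pvLbits m ++ List.replicate (n - (pvLbits m).length) '0' =
      (List.range n).map (fun k => if m.testBit k then '1' else '0') := by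
  induction n with
  | zero => intro m h1 h2; omega
  | succ n ih =>
    intro m h1 h2
    rw [pvLbits_pos m (by omega)]
    rw [List.range_succ_eq_map, List.map_cons, List.map_map]
    have hhead : (m % 2).digitChar = (if m.testBit 0 then '1' else '0') := by
      have hm : m % 2 = 0 ∨ m % 2 = 1 := by omega
      rcases hm with h | h
      · have hb : m.testBit 0 = false := by simp [Nat.testBit_zero]; omega
        rw [h, hb]; rfl
      · have hb : m.testBit 0 = true := by simp [Nat.testBit_zero]; omega
        rw [h, hb]; rfl
    have htail : ((List.range n).map Nat.succ).map (fun k => if m.testBit k then '1' else '0')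
        = (List.range n).map (fun k => if (m / 2).testBit k then '1' else '0') := by
      rw [List.map_map]
      refine List.map_congr_left ?_
      intro k _
      simp [Function.comp, Nat.succ_eq_add_one, Nat.testBit_add_one]
    by_cases hz : m / 2 = 0
    · have hm1 : m = 1 := by omega
      subst hm1
      have h0 : (List.range n).map (fun k => if (1 / 2 : Nat).testBit k then '1' else '0')
          = List.replicate n '0' := by
        have hall : ∀ k ∈ List.range n, (if (1 / 2 : Nat).testBit k then '1' else '0') = '0' := by
          intro k _
          simp [Nat.zero_testBit]
        rw [List.map_congr_left hall]
        simp [List.map_const']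
      rw [← List.map_map, htail, h0, hhead]
      rw [show (1 / 2 : Nat) = 0 from rfl, pvLbits_zero]
      simp
    · have hp : m < 2 ^ n * 2 := by rw [← Nat.pow_succ]; exact h2
      have ih' := ih (m / 2) (by omega) (by omega)
      simp only [List.length_cons, List.cons_append]
      rw [← List.map_map, htail, ← ih', hhead]
      rw [show n + 1 - ((pvLbits (m / 2)).length + 1) = n - (pvLbits (m / 2)).length from by omega]

theorem pvLbits'_pad (n : Nat) (m : Nat) (hn : 1 ≤ n) (h2 : m < 2 ^ n) :
    pvLbits' m ++ List.replicate (n - (pvLbits' m).length) '0' =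
      (List.range n).map (fun k => if m.testBit k then '1' else '0') := by
  by_cases h : m = 0
  · subst h
    have : ∀ k ∈ List.range n, (if Nat.testBit 0 k then '1' else '0') = '0' := by
      intro k _; simp [Nat.zero_testBit]
    rw [List.map_congr_left this]
    simp only [pvLbits', List.map_const']
    cases n with
    | zero => omega
    | succ n => simp [List.replicate_succ]
  · simp only [pvLbits', if_neg h]
    exact pvLbits_pad n m (by omega) h2

theorem pvRevMapRange (n : Nat) (g : Nat → Char) :
    ((List.range n).map g).reverse = (List.range n).map (fun j => g (n - 1 - j)) := by
  apply List.ext_getElem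
  · simp
  · intro j h1 h2
    have h1' : j < n := by simpa using h1
    rw [List.getElem_reverse, List.getElem_map, List.getElem_map, List.getElem_range,
      List.getElem_range]
    clear h1'
    congr 1
    simp

-- big-endian padded form: (n - len)*'0' ++ toDigits = pvBits n m
theorem pvPadA (n m : Nat) (hn : 1 ≤ n) (h2 : m < 2 ^ n) :
    List.replicate (n - (Nat.toDigits 2 m).length) '0' ++ Nat.toDigits 2 m = pvBits n m := by
  rw [pvToDigits_eq]
  have h := congrArg List.reverse (pvLbits'_pad n m hn h2)
  rw [List.reverse_append, List.reverse_replicate] at h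
  simp only [List.length_reverse]
  rw [h]
  unfold pvBits
  exact pvRevMapRange n _

theorem pvBits_getElem (n m j : Nat) (hj : j < n) :
    (pvBits n m)[j]'(by simp [pvBits]; omega) = (if m.testBit (n - 1 - j) then '1' else '0') := by
  simp [pvBits]

theorem pvBits_length (n m : Nat) : (pvBits n m).length = n := by simp [pvBits]

theorem pvBits_map_translate (N m : Nat) :
    (pvBits N m).map pvTranslate
      = (List.range N).map (fun j => pvTranslate (if m.testBit (N - 1 - j) then '1' else '0')) := by
  unfold pvBits
  rw [List.map_map]
  rfl

-- zfill on a sign-free digit string is left padding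
theorem pvZfill_eq (n m : Nat) (hn : 1 ≤ n) (h2 : m < 2 ^ n) :
    PySem.Chars.zfill (Nat.toDigits 2 m) (n : Int) = pvBits n m := by
  rw [← pvPadA n m hn h2]
  unfold PySem.Chars.zfill
  rcases hd : Nat.toDigits 2 m with _ | ⟨c, rest⟩
  · exact absurd (pvToDigits_eq m ▸ hd) (by simpa using pvLbits'_ne_nil m)
  · have hc : c = '0' ∨ c = '1' := by
      have : c ∈ pvLbits' m := by
        have : c ∈ (pvLbits' m).reverse := by rw [← pvToDigits_eq, hd]; simp
        simpa using this
      exact pvLbits'_chars m c this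
    have hcne : ¬ (c = '+' ∨ c = '-') := by rcases hc with h | h <;> subst h <;> decide
    by_cases hle : (n : Int) ≤ ((c :: rest).length : Int)
    · rw [if_pos hle]
      have hlen : n ≤ (c :: rest).length := by exact_mod_cast hle
      rw [show n - (c :: rest).length = 0 from by omega]
      rfl
    · rw [if_neg hle]
      simp only [hcne, if_false]
      congr 1

-- pyRange 0 n 1 for 0 ≤ n
theorem pvPyRange_eq (n : Int) (hn : 0 ≤ n) :
    PySem.List.pyRange 0 n 1 = (List.range n.toNat).map (fun (k : Nat) => (k : Int)) := by
  unfold PySem.List.pyRange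
  by_cases h0 : 0 < n
  · simp only [if_neg (by norm_num : (1:Int) ≠ 0), if_pos (by norm_num : (0:Int) < 1), if_pos h0]
    rw [show ((n - 0 + 1 - 1) / 1 : Int) = n from by omega]
    refine List.map_congr_left ?_
    intro k _
    simp
  · have : n = 0 := by omega
    subst this
    simp

-- foldl that appends one of two characters
theorem pvFoldl_append_ite {α : Type} (l : List α) (p : α → Prop) [DecidablePred p]
    (u v : Char) (acc : List Char) :
    l.foldl (fun acc x => if p x then acc ++ [u] else acc ++ [v]) acc
      = acc ++ l.map (fun x => if p x then u else v) := by
  induction l generalizing acc with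
  | nil => simp
  | cons x xs ih =>
    simp only [List.foldl_cons, List.map_cons]
    by_cases h : p x <;> simp [h, ih]

-- foldl that appends one string per element
theorem pvFoldl_append_map {α β : Type} (l : List α) (g : α → β) (acc : List β) :
    l.foldl (fun acc x => acc ++ [g x]) acc = acc ++ l.map g := by
  induction l generalizing acc with
  | nil => simp
  | cons x xs ih => simp [ih]

-- per-row equality
theorem pvRow_eq (N : Nat) (a b : Int) (hN : 1 ≤ N)
    (ha0 : 0 ≤ a) (hb0 : 0 ≤ b) (ha : a < 2 ^ N) (hb : b < 2 ^ N) :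
    (List.range N).map (fun (j : Nat) =>
      if (PySem.Int.ofChars? [PySem.List.pyGetD
            (List.replicate ((N : Int) - ((PySem.Int.toBinChars a).length : Int)).toNat '0'
              ++ PySem.Int.toBinChars a) (j : Int) ' ']).getD 0 +
         (PySem.Int.ofChars? [PySem.List.pyGetD
            (List.replicate ((N : Int) - ((PySem.Int.toBinChars b).length : Int)).toNat '0'
              ++ PySem.Int.toBinChars b) (j : Int) ' ']).getD 0 ≥ 1
      then '#' else ' ')
    = (PySem.Chars.zfill (PySem.Int.toBinChars (PySem.Int.bor a b)) (N : Int)).map pvTranslate := by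
  have hA : PySem.Int.toBinChars a = Nat.toDigits 2 a.toNat := by
    unfold PySem.Int.toBinChars
    rw [if_neg (by omega)]
  have hB : PySem.Int.toBinChars b = Nat.toDigits 2 b.toNat := by
    unfold PySem.Int.toBinChars
    rw [if_neg (by omega)]
  have haN : a.toNat < 2 ^ N := by
    have : ((2:Int))^N = ((2^N : Nat) : Int) := by push_cast; ring
    omega
  have hbN : b.toNat < 2 ^ N := by
    have : ((2:Int))^N = ((2^N : Nat) : Int) := by push_cast; ring
    omega
  have hor : PySem.Int.bor a b = ((a.toNat ||| b.toNat : Nat) : Int) := PySem.Int.bor_of_nonneg ha0 hb0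
  have horN : a.toNat ||| b.toNat < 2 ^ N := Nat.or_lt_two_pow haN hbN
  have hcast : ∀ (m : Nat), m < 2 ^ N →
      List.replicate ((N : Int) - ((Nat.toDigits 2 m).length : Int)).toNat '0'
        ++ Nat.toDigits 2 m = pvBits N m := by
    intro m hm
    have : ((N : Int) - ((Nat.toDigits 2 m).length : Int)).toNat
        = N - (Nat.toDigits 2 m).length := by omega
    rw [this]
    exact pvPadA N m hN hm
  rw [hA, hB, hor, hcast a.toNat haN, hcast b.toNat hbN]
  have hzf : PySem.Int.toBinChars ((a.toNat ||| b.toNat : Nat) : Int)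
      = Nat.toDigits 2 (a.toNat ||| b.toNat) := by
    unfold PySem.Int.toBinChars
    rw [if_neg (by simp)]
    simp
  rw [hzf, pvZfill_eq N _ hN horN, pvBits_map_translate]
  refine List.map_congr_left ?_
  intro j hj
  simp only [List.mem_range] at hj
  have hget : ∀ m : Nat, PySem.List.pyGetD (pvBits N m) (j : Int) ' '
      = (if m.testBit (N - 1 - j) then '1' else '0') := by
    intro m
    rw [PySem.List.pyGetD_natCast]
    rw [List.getD_eq_getElem _ _ (by simpa [pvBits_length] using hj)]
    exact pvBits_getElem N m j hj
  rw [hget a.toNat, hget b.toNat, Nat.testBit_or]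
  by_cases h1 : a.toNat.testBit (N - 1 - j) <;>
    by_cases h2 : b.toNat.testBit (N - 1 - j) <;>
      simp [h1, h2, pvTranslate] <;> decide

-- elements of take are the getD values
theorem pvTake_getD (l : List Int) (N j : Nat) (hj : j < N) (hlen : N ≤ l.length)
    (h : ∀ a ∈ l.take N, 0 ≤ a ∧ a < 2 ^ N) :
    0 ≤ l.getD j 0 ∧ l.getD j 0 < 2 ^ N := by
  have hjl : j < l.length := lt_of_lt_of_le hj hlen
  rw [List.getD_eq_getElem l 0 hjl]
  apply h
  have htk : j < (List.take N l).length := by simp; omega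
  have : (List.take N l)[j]'htk = l[j]'hjl := List.getElem_take
  rw [← this]
  exact List.getElem_mem htk

-- ===== VERDICT (by name: the statement is the Claim_ definition above) =====
theorem solution_spec : Claim_equal_solution := by
  intro n arr1 arr2 _ hpre
  obtain ⟨h1, h2, h3, h4⟩ := hpre
  unfold Spec_solution solution solution_alt
  by_cases hn : 0 ≤ n
  · rw [pvPyRange_eq n hn]
    set N := n.toNat with hNdef
    have hnN : (N : Int) = n := by omega
    rw [pvFoldl_append_map, List.nil_append]
    refine List.map_congr_left ?_
    intro i hi
    obtain ⟨k, hk, rfl⟩ := List.mem_map.mp hi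
    simp only [List.mem_range] at hk
    congr 1
    refine Eq.trans (pvFoldl_append_ite _ _ '#' ' ' []) ?_
    rw [List.nil_append, List.map_map]
    have hga := pvTake_getD arr1 N k hk (by omega) h3
    have hgb := pvTake_getD arr2 N k hk (by omega) h4
    have hda : PySem.List.pyGetD arr1 ((k : Nat) : Int) 0 = arr1.getD k 0 := by
      rw [PySem.List.pyGetD_natCast]
    have hdb : PySem.List.pyGetD arr2 ((k : Nat) : Int) 0 = arr2.getD k 0 := by
      rw [PySem.List.pyGetD_natCast]
    rw [hda, hdb, ← hnN]
    exact pvRow_eq N (arr1.getD k 0) (arr2.getD k 0) (by omega) hga.1 hgb.1 hga.2 hgb.2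
  · have hempty : PySem.List.pyRange 0 n 1 = [] := by
      unfold PySem.List.pyRange
      simp only [if_neg (by norm_num : (1:Int) ≠ 0), if_pos (by norm_num : (0:Int) < 1)]
      rw [if_neg (by omega)]
      simp
    rw [hempty]
    rfl
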